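-- pv_equiv track=rewrite | github.com/rxb06/Passclip | passclip.py | validate_entry_name
-- ===== SOURCE A (Python) =====
-- from typing import Dict, List, Optional, Tuple
--
-- def validate_entry_name(name: str) -> Tuple[bool, str]:
--     """Validate a pass entry name. Returns (ok, error_message)."""
--     if not name or not name.strip():
--         return False, "Entry name cannot be empty."
--     if len(name) > 200:
--         return False, "Entry name too long (max 200 characters)."
--     if ".." in name:
--         return False, "Entry name cannot contain '..'."
--     if name.startswith("/") or name.startswith("-"):
--         return False, "Entry name cannot start with '/' or '-'."
--     if name.count("/") > 10:
--         return False, "Entry name has too many path components (max 10)."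
--     # Reject shell metacharacters and dangerous characters
--     if any(c in name for c in "`$(){}|;&<>!\\\x00"):
--         return False, "Entry name contains invalid characters."
--     # Reject control characters
--     if any(ord(c) < 32 for c in name):
--         return False, "Entry name contains control characters."
--     return True, ""
-- ===== SOURCE B (Python) =====
-- def validate_entry_name(name: str):
--     """Single-pass re-implementation: gather character statistics in one scan, then judge them."""
--     METAS = "`$(){}|;&<>!\\\x00"
--     n = 0
--     nonspace = False
--     dotdot = False
--     prev = ""
--     slashes = 0
--     meta = False
--     ctrl = False
--     for c in name:
--         n += 1
--         if not c.isspace():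
--             nonspace = True
--         if prev == "." and c == ".":
--             dotdot = True
--         prev = c
--         if c == "/":
--             slashes += 1
--         if c in METAS:
--             meta = True
--         if ord(c) < 32:
--             ctrl = True
--     if not nonspace:
--         return False, "Entry name cannot be empty."
--     if n > 200:
--         return False, "Entry name too long (max 200 characters)."
--     if dotdot:
--         return False, "Entry name cannot contain '..'."
--     if name[0] in "/-":
--         return False, "Entry name cannot start with '/' or '-'."
--     if slashes > 10:
--         return False, "Entry name has too many path components (max 10)."
--     if meta:
--         return False, "Entry name contains invalid characters."
--     if ctrl:
--         return False, "Entry name contains control characters."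
--     return True, ""
-- ===== Notes on version B (the rewrite author's own statement) =====
-- stated objective: alternative
-- what changed: Replaced A's sequence of independent string-method checks (strip, substring containment, startswith, slash count, two any() scans) by a single character pass that accumulates statistics (length, non-space seen, adjacent-dot pair, slash count, metachar/control flags) followed by a plain if-chain over the stats.
import Mathlib
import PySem

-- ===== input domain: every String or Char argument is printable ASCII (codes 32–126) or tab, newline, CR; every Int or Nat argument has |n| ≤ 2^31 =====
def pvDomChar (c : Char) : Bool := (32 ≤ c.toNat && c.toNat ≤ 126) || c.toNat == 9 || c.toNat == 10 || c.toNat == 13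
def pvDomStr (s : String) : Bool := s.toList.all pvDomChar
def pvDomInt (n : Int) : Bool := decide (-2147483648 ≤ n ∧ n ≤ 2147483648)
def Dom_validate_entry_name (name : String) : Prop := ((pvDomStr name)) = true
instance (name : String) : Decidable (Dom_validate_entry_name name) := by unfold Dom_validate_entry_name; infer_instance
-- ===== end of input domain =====

-- B replaces A's sequence of independent string-method scans by one accumulating character pass
-- followed by an if-chain over the accumulated statistics (objective: alternative decomposition).

-- the shell metacharacter string "`$(){}|;&<>!\\\x00" of the Python source
def pvMetas : List Char := ['`', '$', '(', ')', '{', '}', '|', ';', '&', '<', '>', '!', '\\', '\x00']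

-- ===== PORT A =====
def validate_entry_name (name : String) : Bool × String :=
  let cs := name.toList
  if cs.isEmpty || (PySem.Chars.strip cs).isEmpty then
    (false, "Entry name cannot be empty.")
  else if (cs.length : Int) > 200 then
    (false, "Entry name too long (max 200 characters).")
  else if PySem.Chars.isIn ['.', '.'] cs then
    (false, "Entry name cannot contain '..'.")
  else if PySem.Chars.startswith cs ['/'] || PySem.Chars.startswith cs ['-'] then
    (false, "Entry name cannot start with '/' or '-'.")
  else if PySem.Chars.count cs ['/'] > 10 then
    (false, "Entry name has too many path components (max 10).")
  else if pvMetas.any (fun c => PySem.Chars.isIn [c] cs) then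
    (false, "Entry name contains invalid characters.")
  else if cs.any (fun c => decide (c.toNat < 32)) then
    (false, "Entry name contains control characters.")
  else (true, "")

-- ===== PORT B =====
-- state: (n, (nonspace, ((dotdot, prev), (slashes, (meta, ctrl)))))
def validate_entry_name_alt (name : String) : Bool × String :=
  let cs := name.toList
  let st :=
    cs.foldl
      (fun s c =>
        (s.1 + 1,
         (s.2.1 || !PySem.Chars.isspace c,
          ((s.2.2.1.1 || (s.2.2.1.2 == ['.'] && c == '.'), [c]),
           ((if c == '/' then s.2.2.2.1 + 1 else s.2.2.2.1),
            (s.2.2.2.2.1 || PySem.Chars.isIn [c] pvMetas,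
             s.2.2.2.2.2 || decide (c.toNat < 32)))))))
      ((0 : Int), (false, ((false, ([] : List Char)), ((0 : Int), (false, false)))))
  if !st.2.1 then
    (false, "Entry name cannot be empty.")
  else if st.1 > 200 then
    (false, "Entry name too long (max 200 characters).")
  else if st.2.2.1.1 then
    (false, "Entry name cannot contain '..'.")
  else if (match PySem.List.pyGet? cs 0 with
           | some c => PySem.Chars.isIn [c] ['/', '-']
           | none => false) then
    (false, "Entry name cannot start with '/' or '-'.")
  else if st.2.2.2.1 > 10 then
    (false, "Entry name has too many path components (max 10).")
  else if st.2.2.2.2.1 then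
    (false, "Entry name contains invalid characters.")
  else if st.2.2.2.2.2 then
    (false, "Entry name contains control characters.")
  else (true, "")

-- ===== PRECONDITION & SPEC =====
def Spec_validate_entry_name (name : String) (out : Bool × String) : Prop := out = validate_entry_name_alt name
instance (name : String) (out : Bool × String) : Decidable (Spec_validate_entry_name name out) := by unfold Spec_validate_entry_name; infer_instance

-- ===== CLAIM (what is proved, stated in full; the proofs are below) =====
def Claim_equal_validate_entry_name : Prop := ∀ (name : String), Dom_validate_entry_name name → Spec_validate_entry_name name (validate_entry_name name)

-- ===== LEMMAS AND PROOFS =====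

theorem pv_strip_empty_iff (cs : List Char) :
    (PySem.Chars.strip cs).isEmpty = cs.all PySem.Chars.isspace := by
  rw [Bool.eq_iff_iff]
  simp only [PySem.Chars.strip, PySem.Chars.rstrip, PySem.Chars.lstrip,
    List.isEmpty_iff, List.reverse_eq_nil_iff, List.dropWhile_eq_nil_iff,
    List.mem_reverse, List.all_eq_true]
  constructor
  · intro h x hx
    rw [← List.takeWhile_append_dropWhile (p := PySem.Chars.isspace) (l := cs)] at hx
    rcases List.mem_append.mp hx with h1 | h2
    · exact List.mem_takeWhile_imp h1
    · exact h x h2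
  · intro h x hx
    exact h x ((List.dropWhile_sublist _).mem hx)

theorem pv_singleton_infix_iff (a : Char) (cs : List Char) :
    [a] <:+: cs ↔ a ∈ cs := by
  constructor
  · intro h; exact List.singleton_sublist.mp h.sublist
  · intro h
    obtain ⟨s, t, rfl⟩ := List.append_of_mem h
    exact ⟨s, t, by simp⟩

theorem pv_isIn_singleton (a : Char) (cs : List Char) :
    PySem.Chars.isIn [a] cs = decide (a ∈ cs) := by
  rw [Bool.eq_iff_iff, PySem.Chars.isIn_iff_infix, decide_eq_true_iff]
  exact pv_singleton_infix_iff a cs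

theorem pv_count_go (a : Char) : ∀ (l : List Char) (fuel acc : ℕ), l.length ≤ fuel →
    PySem.Chars.count.go [a] fuel l acc = acc + l.count a := by
  intro l
  induction l with
  | nil => intro fuel acc h; cases fuel <;> simp [PySem.Chars.count.go]
  | cons c t ih =>
    intro fuel acc h
    simp only [List.length_cons] at h
    cases fuel with
    | zero => omega
    | succ f =>
      rw [PySem.Chars.count.go]
      by_cases hc : a = c
      · subst hc
        simp only [List.isPrefixOf, beq_self_eq_true, Bool.true_and, if_pos,
          List.length_singleton, List.drop_one, List.tail_cons,
          ih f (acc + 1) (by omega), List.count_cons_self]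
        omega
      · have hp : [a].isPrefixOf (c :: t) = false := by
          simp [List.isPrefixOf, hc]
        rw [hp]
        simp only [Bool.false_eq_true, if_false, ih f acc (by omega)]
        simp only [List.count_cons]
        have hb : ¬c = a := fun h => hc h.symm
        simp [hb]

theorem pv_count_singleton (cs : List Char) (a : Char) :
    PySem.Chars.count cs [a] = cs.count a := by
  simp [PySem.Chars.count, pv_count_go a cs cs.length 0 le_rfl]

theorem pv_foldl_or (p : Char → Bool) : ∀ (cs : List Char) (b : Bool),
    cs.foldl (fun b c => b || p c) b = (b || cs.any p) := by
  intro cs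
  induction cs with
  | nil => simp
  | cons c t ih => intro b; simp [ih, Bool.or_assoc]

theorem pv_foldl_len : ∀ (cs : List Char) (n : Int),
    cs.foldl (fun n _ => n + 1) n = n + cs.length := by
  intro cs
  induction cs with
  | nil => simp
  | cons c t ih => intro n; simp [ih]; ring

theorem pv_fold_dotdot : ∀ (cs : List Char) (b : Bool) (p : List Char),
    (cs.foldl (fun (s : Bool × List Char) c => (s.1 || (s.2 == ['.'] && c == '.'), [c])) (b, p)).1
      = (b || (p == ['.'] && cs.head? == some '.') || decide (['.', '.'] <:+: cs)) := by
  intro cs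
  induction cs with
  | nil => intro b p; simp [List.infix_nil]
  | cons c t ih =>
    intro b p
    simp only [List.foldl_cons, ih, List.head?_cons]
    rw [Bool.eq_iff_iff]
    simp only [Bool.or_eq_true, Bool.and_eq_true, beq_iff_eq, decide_eq_true_iff,
      Option.some.injEq, List.infix_cons_iff, List.cons_prefix_cons]
    have hpre : ['.'] <+: t ↔ t.head? = some '.' := by
      cases t with
      | nil => simp
      | cons x y => simp [List.cons_prefix_cons, eq_comm]
    rw [hpre]
    simp only [List.cons.injEq, and_true]
    constructor
    · rintro ((h | ⟨h1, h2⟩) | h) <;> tauto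
    · rintro (h | ⟨h1, h2⟩ | h) <;> tauto


theorem pv_isIn_dotdot (cs : List Char) :
    PySem.Chars.isIn ['.', '.'] cs = decide (['.', '.'] <:+: cs) := by
  rw [Bool.eq_iff_iff, PySem.Chars.isIn_iff_infix, decide_eq_true_iff]

theorem pv_meta_comm (cs : List Char) :
    cs.any (fun c => PySem.Chars.isIn [c] pvMetas) = pvMetas.any (fun c => PySem.Chars.isIn [c] cs) := by
  rw [Bool.eq_iff_iff]
  simp only [List.any_eq_true, pv_isIn_singleton, decide_eq_true_iff]
  tauto

theorem pv_not_any_not (cs : List Char) (p : Char → Bool) :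
    (!(cs.any fun c => !p c)) = cs.all p := (List.all_eq_not_any_not).symm

theorem pv_slash_cast (k : ℕ) : ((10 : Int) < (k : Int)) ↔ 10 < k := by omega

theorem pv_empty_cond (cs : List Char) :
    (cs.isEmpty || cs.all PySem.Chars.isspace) = cs.all PySem.Chars.isspace := by
  cases cs <;> simp

theorem pv_start_cond (cs : List Char) :
    (PySem.Chars.startswith cs ['/'] || PySem.Chars.startswith cs ['-'])
      = (match PySem.List.pyGet? cs 0 with
         | some c => PySem.Chars.isIn [c] ['/', '-']
         | none => false) := by
  cases cs with
  | nil => simp [PySem.List.pyGet?, PySem.Chars.startswith]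
  | cons c t =>
    have h0 : PySem.List.pyGet? (c :: t) 0 = some c := by
      simp [PySem.List.pyGet?, PySem.List.pyIdx?]
    rw [h0, Bool.eq_iff_iff]
    simp only [Bool.or_eq_true, PySem.Chars.startswith_iff, List.cons_prefix_cons,
      pv_isIn_singleton, decide_eq_true_iff, List.mem_cons, List.not_mem_nil]
    constructor
    · rintro (⟨h, -⟩ | ⟨h, -⟩) <;> simp [h.symm]
    · rintro (h | (h | h)) <;> simp [h] <;> tauto

theorem pv_fold_split (cs : List Char) :
    (cs.foldl
      (fun (s : Int × (Bool × ((Bool × List Char) × (Int × (Bool × Bool))))) c =>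
        (s.1 + 1,
         (s.2.1 || !PySem.Chars.isspace c,
          ((s.2.2.1.1 || (s.2.2.1.2 == ['.'] && c == '.'), [c]),
           ((if c == '/' then s.2.2.2.1 + 1 else s.2.2.2.1),
            (s.2.2.2.2.1 || PySem.Chars.isIn [c] pvMetas,
             s.2.2.2.2.2 || decide (c.toNat < 32)))))))
      ((0 : Int), (false, ((false, ([] : List Char)), ((0 : Int), (false, false))))))
    = (cs.foldl (fun n _ => n + 1) 0,
       (cs.foldl (fun b c => b || !PySem.Chars.isspace c) false,
        (cs.foldl (fun (q : Bool × List Char) c => (q.1 || (q.2 == ['.'] && c == '.'), [c])) (false, []),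
         (cs.foldl (fun a c => if c == '/' then a + 1 else a) 0,
          (cs.foldl (fun b c => b || PySem.Chars.isIn [c] pvMetas) false,
           cs.foldl (fun b c => b || decide (c.toNat < 32)) false))))) := by
  rw [PySem.List.foldl_prod_mk (fun n (_ : Char) => n + 1)
        (fun (s : Bool × ((Bool × List Char) × (Int × (Bool × Bool)))) c =>
          (s.1 || !PySem.Chars.isspace c,
           ((s.2.1.1 || (s.2.1.2 == ['.'] && c == '.'), [c]),
            ((if c == '/' then s.2.2.1 + 1 else s.2.2.1),
             (s.2.2.2.1 || PySem.Chars.isIn [c] pvMetas,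
              s.2.2.2.2 || decide (c.toNat < 32)))))),
      PySem.List.foldl_prod_mk (fun b c => b || !PySem.Chars.isspace c)
        (fun (s : (Bool × List Char) × (Int × (Bool × Bool))) c =>
          ((s.1.1 || (s.1.2 == ['.'] && c == '.'), [c]),
           ((if c == '/' then s.2.1 + 1 else s.2.1),
            (s.2.2.1 || PySem.Chars.isIn [c] pvMetas,
             s.2.2.2 || decide (c.toNat < 32))))),
      PySem.List.foldl_prod_mk (fun (q : Bool × List Char) c => (q.1 || (q.2 == ['.'] && c == '.'), [c]))
        (fun (s : Int × (Bool × Bool)) c =>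
          ((if c == '/' then s.1 + 1 else s.1),
           (s.2.1 || PySem.Chars.isIn [c] pvMetas,
            s.2.2 || decide (c.toNat < 32)))),
      PySem.List.foldl_prod_mk (fun a c => if c == '/' then a + 1 else a)
        (fun (s : Bool × Bool) c =>
          (s.1 || PySem.Chars.isIn [c] pvMetas, s.2 || decide (c.toNat < 32))),
      PySem.List.foldl_prod_mk (fun b c => b || PySem.Chars.isIn [c] pvMetas)
        (fun b c => b || decide (c.toNat < 32))]

-- ===== VERDICT (by name: the statement is the Claim_ definition above) =====
theorem validate_entry_name_spec : Claim_equal_validate_entry_name := by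
  intro name _
  show validate_entry_name name = validate_entry_name_alt name
  unfold validate_entry_name validate_entry_name_alt
  simp only [pv_fold_split]
  simp only [pv_fold_dotdot, pv_foldl_or, pv_foldl_len, PySem.List.foldl_beq_add_one]
  simp only [pv_strip_empty_iff, pv_empty_cond, pv_count_singleton, pv_isIn_dotdot,
    pv_start_cond, pv_meta_comm, pv_not_any_not, Bool.false_or, zero_add, pv_slash_cast,
    show (([] : List Char) == ['.']) = false from rfl, Bool.false_and]
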